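-- pv_equiv track=rewrite | github.com/andrewwang247/set-cover | cover.py | biggest_intersection
-- ===== SOURCE A (Python) =====
-- from typing import Dict, Optional
--
-- def largest_valued_key(dic: Dict[str, set]) -> str:
--     """Find the key with the largest value."""
--     biggest_size = -1
--     biggest_key = None
--     for key, value in dic.items():
--         length = len(value)
--         if length > biggest_size:
--             biggest_size = length
--             biggest_key = key
--     assert isinstance(biggest_key, str)
--     return biggest_key
--
-- def biggest_intersection(
--         universe: set, subsets: Dict[str, set], large: bool) -> str:
--     """Get the subset with the greatest intersection with universe."""
--     opt_size = -1
--     # Stores key value pairs with the largest intersection.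
--     opt: Dict[str, set] = dict()
--     opt_key = str()
--     for key, value in subsets.items():
--         # Compare the intersection size.
--         intersect_size = len(universe.intersection(value))
--         if intersect_size > opt_size:
--             opt_size = intersect_size
--             opt_key = key
--             # Reset opt dictionary.
--             opt.clear()
--             opt[key] = value
--         elif intersect_size == opt_size:
--             opt[key] = value
--     return largest_valued_key(opt) if large else opt_key
-- ===== SOURCE B (Python) =====
-- def biggest_intersection(universe, subsets, large):
--     """Get the subset with the greatest intersection with universe."""
--     if large:
--         best = max(subsets.items(),
--                    key=lambda kv: (len(universe & kv[1]), len(kv[1])))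
--     else:
--         best = max(subsets.items(),
--                    key=lambda kv: len(universe & kv[1]))
--     return best[0]
-- ===== Notes on version B (the rewrite author's own statement) =====
-- stated objective: idiomatic
-- what changed: Replaces A's explicit loop plus candidate dictionary plus second helper pass (largest_valued_key) with a single built-in max() over the items, keyed by the intersection size (and, in large mode, lexicographically by the subset size), relying on max's first-wins tie rule.
-- outside the precondition, e.g. on biggest_intersection(set(), {}, False): A returns '', B raises ValueError
import Mathlib
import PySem

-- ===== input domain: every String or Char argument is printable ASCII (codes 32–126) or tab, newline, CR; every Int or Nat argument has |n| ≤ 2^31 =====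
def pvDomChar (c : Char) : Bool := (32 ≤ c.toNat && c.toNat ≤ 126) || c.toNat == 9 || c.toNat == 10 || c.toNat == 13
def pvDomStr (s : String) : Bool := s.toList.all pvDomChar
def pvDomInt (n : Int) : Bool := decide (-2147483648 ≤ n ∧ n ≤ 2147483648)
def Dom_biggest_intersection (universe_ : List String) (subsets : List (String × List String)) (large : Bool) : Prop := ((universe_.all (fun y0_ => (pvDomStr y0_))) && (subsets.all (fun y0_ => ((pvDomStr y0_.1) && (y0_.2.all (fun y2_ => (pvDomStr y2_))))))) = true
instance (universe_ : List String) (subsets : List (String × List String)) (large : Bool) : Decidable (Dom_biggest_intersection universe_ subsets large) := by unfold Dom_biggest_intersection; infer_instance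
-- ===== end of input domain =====

-- B replaces A's loop + candidate dict + second helper pass with a single built-in max()
-- over the items (lexicographic key in large mode): same values, idiomatic decomposition.


-- ===== PORT A =====
-- len(universe.intersection(value)): both arguments denote Python sets (distinct elements).
def pvIsz (u : List String) (v : List String) : Int :=
  ((PySem.Set.inter (PySem.Set.ofList u) v).length : Int)

-- len(value) for a set value.
def pvSlen (v : List String) : Int := ((PySem.Set.ofList v).length : Int)

-- loop body of largest_valued_key: state (biggest_size, biggest_key)
def pvLvkStep (st : Int × Option String) (kv : String × List String) : Int × Option String :=
  if pvSlen kv.2 > st.1 then (pvSlen kv.2, some kv.1) else st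

def largest_valued_key (d : PySem.Dict String (List String)) : String :=
  let st := d.items.foldl pvLvkStep (-1, none)
  st.2.getD ""   -- none = the assert fails (AssertionError); unreachable under Pre_

-- loop body of A: state (opt_size, opt, opt_key)
def pvStepA (u : List String) (st : Int × PySem.Dict String (List String) × String)
    (kv : String × List String) : Int × PySem.Dict String (List String) × String :=
  let isz := pvIsz u kv.2
  if isz > st.1 then (isz, PySem.Dict.empty.insert kv.1 kv.2, kv.1)
  else if isz = st.1 then (st.1, st.2.1.insert kv.1 kv.2, st.2.2)
  else st

def biggest_intersection (universe_ : List String) (subsets : List (String × List String)) (large : Bool) : String :=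
  let st := subsets.foldl (pvStepA universe_) (-1, PySem.Dict.empty, "")
  if large then largest_valued_key st.2.1 else st.2.2

-- ===== PORT B =====
def biggest_intersection_alt (universe_ : List String) (subsets : List (String × List String)) (large : Bool) : String :=
  let best :=
    if large then
      PySem.List.max2? subsets (fun kv => pvIsz universe_ kv.2) (fun kv => pvSlen kv.2)
    else
      PySem.List.max? subsets (fun kv => pvIsz universe_ kv.2)
  match best with
  | some kv => kv.1
  | none => ""   -- max() of an empty sequence raises ValueError; unreachable under Pre_

-- ===== PRECONDITION & SPEC =====
-- Pre_ excludes the empty dict (A raises AssertionError when large and returns the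
-- never-inserted sentinel '' when not large, while B's max() raises ValueError) and
-- association lists with duplicate keys, which no Python dict argument can represent.
def Pre_biggest_intersection (universe_ : List String) (subsets : List (String × List String)) (large : Bool) : Prop :=
  subsets ≠ [] ∧ (subsets.map Prod.fst).Nodup
instance (universe_ : List String) (subsets : List (String × List String)) (large : Bool) : Decidable (Pre_biggest_intersection universe_ subsets large) := by unfold Pre_biggest_intersection; infer_instance

def pvWitness_biggest_intersection : List String × (List (String × List String)) × Bool :=
  (["a", "b"], [("x", ["a"]), ("y", ["a", "b", "c"])], true)

def Spec_biggest_intersection (universe_ : List String) (subsets : List (String × List String)) (large : Bool) (out : String) : Prop := out = biggest_intersection_alt universe_ subsets large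
instance (universe_ : List String) (subsets : List (String × List String)) (large : Bool) (out : String) : Decidable (Spec_biggest_intersection universe_ subsets large out) := by unfold Spec_biggest_intersection; infer_instance

-- ===== CLAIM (what is proved, stated in full; the proofs are below) =====
def Claim_equal_biggest_intersection : Prop := ∀ (universe_ : List String) (subsets : List (String × List String)) (large : Bool), Dom_biggest_intersection universe_ subsets large → Pre_biggest_intersection universe_ subsets large → Spec_biggest_intersection universe_ subsets large (biggest_intersection universe_ subsets large)

-- ===== LEMMAS AND PROOFS =====

-- the fold steps hidden inside PySem.List.max? / max2?
def pvStepM (u : List String) (acc : Option (String × List String)) (x : String × List String) :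
    Option (String × List String) :=
  match acc with
  | none => some x
  | some m => if pvIsz u m.2 < pvIsz u x.2 then some x else some m

def pvStepM2 (u : List String) (acc : Option (String × List String)) (x : String × List String) :
    Option (String × List String) :=
  match acc with
  | none => some x
  | some m =>
    if (decide (pvIsz u m.2 < pvIsz u x.2) ||
        !decide (pvIsz u x.2 < pvIsz u m.2) && decide (pvSlen m.2 < pvSlen x.2)) = true
    then some x else some m

lemma pvIsz_nonneg (u v : List String) : 0 ≤ pvIsz u v := by
  simp [pvIsz]

lemma pvSlen_nonneg (v : List String) : 0 ≤ pvSlen v := by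
  simp [pvSlen]

lemma stepA_gt (u : List String) (st : Int × PySem.Dict String (List String) × String)
    (x : String × List String) (h : pvIsz u x.2 > st.1) :
    pvStepA u st x = (pvIsz u x.2, PySem.Dict.empty.insert x.1 x.2, x.1) := by
  simp only [pvStepA]; rw [if_pos h]

lemma stepA_eq (u : List String) (st : Int × PySem.Dict String (List String) × String)
    (x : String × List String) (h : pvIsz u x.2 = st.1) :
    pvStepA u st x = (st.1, st.2.1.insert x.1 x.2, st.2.2) := by
  simp only [pvStepA]; rw [if_neg (by omega), if_pos h]

lemma stepA_lt (u : List String) (st : Int × PySem.Dict String (List String) × String)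
    (x : String × List String) (h : pvIsz u x.2 < st.1) :
    pvStepA u st x = st := by
  simp only [pvStepA]; rw [if_neg (by omega), if_neg (by omega)]

-- invariant for the not-large mode
def R1 (u : List String) (st : Int × PySem.Dict String (List String) × String)
    (m : Option (String × List String)) : Prop :=
  (m = none ∧ st.1 = -1) ∨ ∃ v, m = some (st.2.2, v) ∧ pvIsz u v = st.1

lemma inv_nonlarge (u : List String) (l : List (String × List String)) :
    ∀ (st : Int × PySem.Dict String (List String) × String)
      (m : Option (String × List String)), R1 u st m →
      R1 u (l.foldl (pvStepA u) st) (l.foldl (pvStepM u) m) := by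
  induction l with
  | nil => intro st m h; simpa using h
  | cons x t ih =>
    intro st m h
    simp only [List.foldl_cons]
    apply ih
    have h0 := pvIsz_nonneg u x.2
    rcases h with ⟨hm, hs⟩ | ⟨v, hm, hv⟩
    · subst hm
      rw [stepA_gt u st x (by omega)]
      exact Or.inr ⟨x.2, rfl, rfl⟩
    · subst hm
      have hM : ∀ y, pvStepM u (some (st.2.2, v)) y =
          if pvIsz u v < pvIsz u y.2 then some y else some (st.2.2, v) := fun y => rfl
      rcases lt_trichotomy (pvIsz u x.2) st.1 with hlt | heq | hgt
      · rw [stepA_lt u st x hlt, hM, if_neg (by omega)]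
        exact Or.inr ⟨v, rfl, hv⟩
      · rw [stepA_eq u st x heq, hM, if_neg (by omega)]
        exact Or.inr ⟨v, rfl, hv⟩
      · rw [stepA_gt u st x hgt, hM, if_pos (by omega)]
        exact Or.inr ⟨x.2, rfl, rfl⟩

-- invariant for the large mode
def R2 (u : List String) (st : Int × PySem.Dict String (List String) × String)
    (m : Option (String × List String)) : Prop :=
  (m = none ∧ st.1 = -1 ∧ st.2.1.items = []) ∨
  ∃ kb vb, m = some (kb, vb) ∧ pvIsz u vb = st.1 ∧
    st.2.1.items.foldl pvLvkStep (-1, none) = (pvSlen vb, some kb)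

lemma singleton_opt_fold (k : String) (v : List String) :
    (PySem.Dict.empty.insert k v).items.foldl pvLvkStep (-1, none) = (pvSlen v, some k) := by
  have h0 := pvSlen_nonneg v
  rw [PySem.Dict.items_insert_of_not_contains PySem.Dict.empty v (PySem.Dict.contains_empty k)]
  simp only [PySem.Dict.empty, List.nil_append, List.foldl_cons,
    List.foldl_nil, pvLvkStep]
  rw [if_pos (by omega)]

lemma inv_large (u : List String) (l : List (String × List String)) :
    ∀ (st : Int × PySem.Dict String (List String) × String)
      (m : Option (String × List String)),
      (l.map Prod.fst).Nodup →
      (∀ p ∈ l, st.2.1.contains p.1 = false) →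
      R2 u st m →
      R2 u (l.foldl (pvStepA u) st) (l.foldl (pvStepM2 u) m) := by
  induction l with
  | nil => intro st m _ _ h; simpa using h
  | cons x t ih =>
    intro st m hnd hfresh h
    simp only [List.map_cons, List.nodup_cons, List.mem_map] at hnd
    have hxt : ∀ p ∈ t, p.1 ≠ x.1 := by
      intro p hp hpe
      exact hnd.1 ⟨p, hp, hpe⟩
    simp only [List.foldl_cons]
    have h0 := pvIsz_nonneg u x.2
    have hl0 := pvSlen_nonneg x.2
    rcases h with ⟨hm, hs, hitems⟩ | ⟨kb, vb, hm, hv, hfold⟩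
    · subst hm
      rw [stepA_gt u st x (by omega)]
      refine ih _ _ hnd.2 ?_ ?_
      · intro p hp
        simp [PySem.Dict.contains_insert, hxt p hp]
      · exact Or.inr ⟨x.1, x.2, rfl, rfl, singleton_opt_fold x.1 x.2⟩
    · subst hm
      have hvb0 : 0 ≤ st.1 := hv ▸ pvIsz_nonneg u vb
      have hM : ∀ (c : Bool) y, ((decide (pvIsz u vb < pvIsz u y.2) ||
            !decide (pvIsz u y.2 < pvIsz u vb) && decide (pvSlen vb < pvSlen y.2)) = c) →
          pvStepM2 u (some (kb, vb)) y = (if c then some y else some (kb, vb)) := by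
        intro c y hc
        simp only [pvStepM2, hc]
      rcases lt_trichotomy (pvIsz u x.2) st.1 with hlt | heq | hgt
      · -- strictly smaller: both sides keep their state
        rw [stepA_lt u st x hlt, hM false x (by
          simp only [Bool.or_eq_false_iff, Bool.and_eq_false_iff, decide_eq_false_iff_not,
            Bool.not_eq_false', decide_eq_true_eq]
          omega)]
        refine ih _ _ hnd.2 (fun p hp => hfresh p (List.mem_cons_of_mem _ hp)) ?_
        exact Or.inr ⟨kb, vb, rfl, hv, hfold⟩
      · -- equal: A appends to opt, B falls through to the second key
        have hxfresh : st.2.1.contains x.1 = false := hfresh x List.mem_cons_self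
        rw [stepA_eq u st x heq,
            hM (decide (pvSlen vb < pvSlen x.2)) x (by
              by_cases hc : pvSlen vb < pvSlen x.2 <;>
                simp only [hc, decide_true, decide_false, Bool.or_true, Bool.or_false,
                  Bool.and_true, Bool.and_false, Bool.or_eq_true, decide_eq_true_eq,
                  decide_eq_false_iff_not, Bool.not_eq_true'] <;> omega)]
        refine ih _ _ hnd.2 ?_ ?_
        · intro p hp
          rw [PySem.Dict.contains_insert st.2.1 x.1 p.1 x.2]
          simp [hxt p hp, hfresh p (List.mem_cons_of_mem _ hp)]
        · have hfold' : (st.2.1.insert x.1 x.2).items.foldl pvLvkStep (-1, none) =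
              if pvSlen vb < pvSlen x.2 then (pvSlen x.2, some x.1) else (pvSlen vb, some kb) := by
            rw [PySem.Dict.items_insert_of_not_contains st.2.1 x.2 hxfresh, List.foldl_append, hfold]
            simp only [List.foldl_cons, List.foldl_nil, pvLvkStep, gt_iff_lt]
          by_cases hc : pvSlen vb < pvSlen x.2
          · rw [if_pos (by simpa using hc)]
            refine Or.inr ⟨x.1, x.2, rfl, heq, ?_⟩
            rw [hfold', if_pos hc]
          · rw [if_neg (by simpa using hc)]
            refine Or.inr ⟨kb, vb, rfl, hv, ?_⟩
            rw [hfold', if_neg hc]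
      · -- strictly bigger: both sides reset
        rw [stepA_gt u st x hgt, hM true x (by
          simp only [Bool.or_eq_true, decide_eq_true_eq]
          left; omega), if_pos rfl]
        refine ih _ _ hnd.2 ?_ ?_
        · intro p hp
          simp [PySem.Dict.contains_insert, hxt p hp]
        · exact Or.inr ⟨x.1, x.2, rfl, rfl, singleton_opt_fold x.1 x.2⟩

lemma max?_eq_foldl (u : List String) (l : List (String × List String)) :
    PySem.List.max? l (fun kv => pvIsz u kv.2) = l.foldl (pvStepM u) none := by
  unfold PySem.List.max?
  congr 1
  funext acc x
  cases acc <;> rfl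

lemma max2?_eq_foldl (u : List String) (l : List (String × List String)) :
    PySem.List.max2? l (fun kv => pvIsz u kv.2) (fun kv => pvSlen kv.2)
      = l.foldl (pvStepM2 u) none := by
  unfold PySem.List.max2?
  congr 1
  funext acc x
  cases acc <;> rfl

lemma foldl_stepM_some_ne_none (u : List String) (t : List (String × List String)) :
    ∀ m : String × List String, t.foldl (pvStepM u) (some m) ≠ none := by
  induction t with
  | nil => intro m h; simp at h
  | cons y s ih =>
    intro m
    simp only [List.foldl_cons, pvStepM]
    split <;> apply ih

lemma foldl_stepM2_some_ne_none (u : List String) (t : List (String × List String)) :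
    ∀ m : String × List String, t.foldl (pvStepM2 u) (some m) ≠ none := by
  induction t with
  | nil => intro m h; simp at h
  | cons y s ih =>
    intro m
    simp only [List.foldl_cons, pvStepM2]
    split <;> apply ih

-- ===== VERDICT (by name: the statement is the Claim_ definition above) =====
theorem biggest_intersection_spec : Claim_equal_biggest_intersection := by
  intro u subsets large _ hpre
  obtain ⟨hne, hnd⟩ := hpre
  unfold Spec_biggest_intersection biggest_intersection biggest_intersection_alt
  cases large with
  | false =>
    simp only [Bool.false_eq_true, if_false]
    rw [max?_eq_foldl]
    have h := inv_nonlarge u subsets (-1, PySem.Dict.empty, "") none (Or.inl ⟨rfl, rfl⟩)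
    rcases h with ⟨hm, _⟩ | ⟨v, hm, _⟩
    · exfalso
      rcases subsets with _ | ⟨a, t⟩
      · exact absurd rfl hne
      · rw [List.foldl_cons] at hm
        exact foldl_stepM_some_ne_none u t a (by simpa [pvStepM] using hm)
    · simp [hm]
  | true =>
    simp only [if_true]
    rw [max2?_eq_foldl]
    have h := inv_large u subsets (-1, PySem.Dict.empty, "") none hnd
      (by intro p _; simp) (Or.inl ⟨rfl, rfl, rfl⟩)
    rcases h with ⟨hm, _, _⟩ | ⟨kb, vb, hm, _, hfold⟩
    · exfalso
      rcases subsets with _ | ⟨a, t⟩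
      · exact absurd rfl hne
      · rw [List.foldl_cons] at hm
        exact foldl_stepM2_some_ne_none u t a (by simpa [pvStepM2] using hm)
    · simp [hm, largest_valued_key, hfold]
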